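-- pv_equiv track=rewrite | github.com/bgillesp/shamir | shamir/adapters/bip39_adapter.py | format_mnemonic
-- ===== SOURCE A (Python) =====
-- from itertools import zip_longest
-- from math import ceil
--
-- def format_mnemonic(str_value, pad_width=10, n_columns=2, numbers=True):
--     words = str.split(str_value)
--     c_len = ceil(len(words) / n_columns)
--     columns = list()
--     for start_idx in range(0, len(words), c_len):
--         # parameters
--         number_max_size = len(str(min(start_idx + c_len, len(words))))
--         format_st = "%%%dd. " % number_max_size
--         # generate and format column
--         col = words[start_idx:start_idx + c_len]
--         col = [format_st % (start_idx + j + 1) + w.ljust(pad_width)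
--                for j, w in enumerate(col)]
--         columns.append(col)
--     rows = zip_longest(*columns, fillvalue='')
--     return '\n'.join([''.join(row) for row in rows])
-- ===== SOURCE B (Python) =====
-- from math import ceil
--
--
-- def format_mnemonic(str_value, pad_width=10, n_columns=2, numbers=True):
--     words = str_value.split()
--     c_len = ceil(len(words) / n_columns)
--     # first pass: column descriptors (start, end, number width)
--     cols = []
--     for start in range(0, len(words), c_len):
--         end = min(start + c_len, len(words))
--         cols.append((start, end, len(str(end))))
--     # second pass: emit row-major by direct indexing
--     lines = []
--     for r in range(c_len):
--         cells = []
--         for start, end, width in cols: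
--             i = start + r
--             if i < end:
--                 cells.append(('%%%dd. ' % width) % (i + 1) + words[i].ljust(pad_width))
--         lines.append(''.join(cells))
--     return '\n'.join(lines)
-- ===== Notes on version B (the rewrite author's own statement) =====
-- stated objective: alternative
-- what changed: Replaces build-all-formatted-columns-then-transpose-with-zip_longest by a two-pass scheme: a first pass precomputes per-column descriptors (start, end, number width) and a second pass emits each output row directly by index arithmetic, never materialising the columns.
import Mathlib
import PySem

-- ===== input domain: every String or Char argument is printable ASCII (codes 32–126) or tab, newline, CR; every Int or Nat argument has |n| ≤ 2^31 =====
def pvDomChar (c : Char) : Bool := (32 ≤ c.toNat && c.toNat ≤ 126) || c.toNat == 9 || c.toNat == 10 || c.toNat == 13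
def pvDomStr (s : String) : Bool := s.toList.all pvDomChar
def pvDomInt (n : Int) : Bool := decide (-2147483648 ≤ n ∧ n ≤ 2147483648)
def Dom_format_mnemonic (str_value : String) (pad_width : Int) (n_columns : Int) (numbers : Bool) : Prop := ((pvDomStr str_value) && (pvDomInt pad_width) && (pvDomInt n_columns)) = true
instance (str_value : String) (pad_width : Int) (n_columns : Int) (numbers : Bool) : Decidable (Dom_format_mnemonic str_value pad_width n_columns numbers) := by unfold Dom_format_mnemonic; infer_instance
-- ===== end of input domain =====

-- B re-implements A's column-build-then-zip_longest-transpose as descriptor precompute + row-major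
-- direct indexing (objective: alternative, same cost). Return values agree on Pre_ (proved below).

-- ===== PORT A =====
-- shared low-level primitives (both Pythons perform the same arithmetic / cell formatting):
-- ceil(a/b) for ints a,b: math.ceil(len/n_columns) is exact here because |len/n_columns| is far
-- below the float-precision threshold on Dom (len is a string's word count, |n_columns| ≤ 2^31)
def pvCeilDiv (a b : Int) : Int := -(PySem.Int.floordiv (-a) b)

-- '%<width>d. ' % num + w.ljust(pad_width)  (exact: num ≥ 0 here so '%d' is rjust with spaces,
-- ljust pads with spaces only when pad_width exceeds the length)
def pvCell (pad_width : Int) (width : Nat) (num : Int) (w : String) : String :=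
  String.mk (List.replicate (width - (PySem.Int.toChars num).length) ' '
      ++ PySem.Int.toChars num ++ ['.', ' '] ++ w.toList
      ++ List.replicate (pad_width - (w.toList.length : Int)).toNat ' ')

lemma pv_sum_tail_le (cols : List (List String)) :
    ((cols.map List.tail).map List.length).sum ≤ (cols.map List.length).sum := by
  induction cols with
  | nil => simp
  | cons c cs ih =>
      simp only [List.map_cons, List.sum_cons]
      have : c.tail.length ≤ c.length := by cases c <;> simp
      omega

lemma pv_sum_tail_lt (cols : List (List String)) (h : ¬ (cols.all List.isEmpty = true)) :
    ((cols.map List.tail).map List.length).sum < (cols.map List.length).sum := by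
  induction cols with
  | nil => simp at h
  | cons c cs ih =>
      simp only [List.map_cons, List.sum_cons]
      by_cases hc : c = []
      · subst hc
        have hcs : ¬ (cs.all List.isEmpty = true) := by simpa using h
        have := ih hcs; simpa using this
      · have h1 : c.tail.length < c.length := by cases c with
          | nil => exact absurd rfl hc
          | cons a t => simp
        have h2 := pv_sum_tail_le cs
        omega

-- itertools.zip_longest(*columns, fillvalue='') (rows, as lists)
def pvZipLongest (cols : List (List String)) : List (List String) :=
  if h : cols.all List.isEmpty = true then []
  else (cols.map (fun c => c.headD "")) :: pvZipLongest (cols.map List.tail)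
termination_by (cols.map List.length).sum
decreasing_by have := pv_sum_tail_lt cols h; simpa using this

def format_mnemonic (str_value : String) (pad_width : Int) (n_columns : Int) (numbers : Bool) : String :=
  let words := PySem.Str.split₀ str_value
  let len : Int := words.length
  let c_len : Int := pvCeilDiv len n_columns
  let columns : List (List String) :=
    (PySem.List.pyRange 0 len c_len).foldl (fun cols start_idx =>
      let number_max_size := (PySem.Int.toChars (min (start_idx + c_len) len)).length
      let col := PySem.List.slice words (some start_idx) (some (start_idx + c_len))
      let col := (PySem.List.enumerate col).map
        (fun jw => pvCell pad_width number_max_size (start_idx + jw.1 + 1) jw.2)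
      cols ++ [col]) []
  PySem.Str.join "\n" ((pvZipLongest columns).map (fun row => PySem.Str.join "" row))

-- ===== PORT B =====
def format_mnemonic_alt (str_value : String) (pad_width : Int) (n_columns : Int) (numbers : Bool) : String :=
  let words := PySem.Str.split₀ str_value
  let len : Int := words.length
  let c_len : Int := pvCeilDiv len n_columns
  -- first pass: column descriptors (start, end, number width)
  let cols : List (Int × Int × Nat) :=
    (PySem.List.pyRange 0 len c_len).foldl (fun ds start =>
      let e := min (start + c_len) len
      ds ++ [(start, e, (PySem.Int.toChars e).length)]) []
  -- second pass: emit row-major by direct indexing (words[i] is always in range when taken)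
  let lines : List String :=
    (PySem.List.pyRange 0 c_len 1).foldl (fun ls r =>
      let cells := cols.foldl (fun acc d =>
        if d.1 + r < d.2.1 then
          acc ++ [pvCell pad_width d.2.2 (d.1 + r + 1) (PySem.List.pyGetD words (d.1 + r) "")]
        else acc) []
      ls ++ [PySem.Str.join "" cells]) []
  PySem.Str.join "\n" lines

-- ===== PRECONDITION & SPEC =====
-- Pre_ excludes exactly the inputs where the Python A raises: n_columns = 0 (ZeroDivisionError in
-- len(words)/n_columns) and ceil(len(words)/n_columns) = 0 (range step 0: ValueError; this covers
-- the empty/whitespace-only string and the negative n_columns that make the ceiling zero).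
def Pre_format_mnemonic (str_value : String) (pad_width : Int) (n_columns : Int) (numbers : Bool) : Prop :=
  n_columns ≠ 0 ∧
  -(PySem.Int.floordiv (-((PySem.Str.split₀ str_value).length : Int)) n_columns) ≠ 0
instance (str_value : String) (pad_width : Int) (n_columns : Int) (numbers : Bool) : Decidable (Pre_format_mnemonic str_value pad_width n_columns numbers) := by unfold Pre_format_mnemonic; infer_instance

def pvWitness_format_mnemonic : String × Int × Int × Bool := ("alpha bravo charlie", 10, 2, true)

def Spec_format_mnemonic (str_value : String) (pad_width : Int) (n_columns : Int) (numbers : Bool) (out : String) : Prop := out = format_mnemonic_alt str_value pad_width n_columns numbers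
instance (str_value : String) (pad_width : Int) (n_columns : Int) (numbers : Bool) (out : String) : Decidable (Spec_format_mnemonic str_value pad_width n_columns numbers out) := by unfold Spec_format_mnemonic; infer_instance

-- ===== CLAIM (what is proved, stated in full; the proofs are below) =====
def Claim_equal_format_mnemonic : Prop := ∀ (str_value : String) (pad_width : Int) (n_columns : Int) (numbers : Bool), Dom_format_mnemonic str_value pad_width n_columns numbers → Pre_format_mnemonic str_value pad_width n_columns numbers → Spec_format_mnemonic str_value pad_width n_columns numbers (format_mnemonic str_value pad_width n_columns numbers)

-- ===== LEMMAS AND PROOFS =====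

theorem pv_witness_ok : Dom_format_mnemonic pvWitness_format_mnemonic.1 pvWitness_format_mnemonic.2.1 pvWitness_format_mnemonic.2.2.1 pvWitness_format_mnemonic.2.2.2 ∧ Pre_format_mnemonic pvWitness_format_mnemonic.1 pvWitness_format_mnemonic.2.1 pvWitness_format_mnemonic.2.2.1 pvWitness_format_mnemonic.2.2.2 := by
  constructor <;> decide

-- proof-side abbreviations for the two ports' loop bodies
def pvColA (W : List String) (pad C : Int) (s : Int) : List String :=
  (PySem.List.enumerate (PySem.List.slice W (some s) (some (s + C)))).map
    (fun jw => pvCell pad ((PySem.Int.toChars (min (s + C) (W.length : Int))).length) (s + jw.1 + 1) jw.2)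

def pvDOf (W : List String) (C : Int) (s : Int) : Int × Int × Nat :=
  (s, min (s + C) (W.length : Int), (PySem.Int.toChars (min (s + C) (W.length : Int))).length)

def pvMaxLen (cols : List (List String)) : Nat := cols.foldr (fun c m => max c.length m) 0

lemma pvMaxLen_cons (c : List String) (cs : List (List String)) :
    pvMaxLen (c :: cs) = max c.length (pvMaxLen cs) := rfl

lemma pv_all_isEmpty_iff (cols : List (List String)) :
    cols.all List.isEmpty = true ↔ pvMaxLen cols = 0 := by
  induction cols with
  | nil => simp [pvMaxLen]
  | cons c cs ih =>
      simp only [List.all_cons, Bool.and_eq_true, pvMaxLen_cons, Nat.max_eq_zero_iff, ih,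
        List.isEmpty_iff, List.length_eq_zero_iff]

lemma pvMaxLen_map_tail (cols : List (List String)) :
    pvMaxLen (cols.map List.tail) = pvMaxLen cols - 1 := by
  induction cols with
  | nil => simp [pvMaxLen]
  | cons c cs ih =>
      simp only [List.map_cons, pvMaxLen_cons, ih, List.length_tail]
      omega

lemma pv_le_maxLen {c : List String} {cols : List (List String)} (h : c ∈ cols) :
    c.length ≤ pvMaxLen cols := by
  induction cols with
  | nil => cases h
  | cons d cs ih =>
      rcases List.mem_cons.mp h with h | h
      · simp [pvMaxLen_cons, h]
      · exact le_trans (ih h) (by simp [pvMaxLen_cons])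

lemma pv_maxLen_le {cols : List (List String)} {K : Nat} (h : ∀ c ∈ cols, c.length ≤ K) :
    pvMaxLen cols ≤ K := by
  induction cols with
  | nil => simp [pvMaxLen]
  | cons c cs ih =>
      simp only [pvMaxLen_cons, max_le_iff]
      exact ⟨h c (by simp), ih fun c hc => h c (by simp [hc])⟩

lemma pv_getD_tail (c : List String) (r : Nat) : c.tail.getD r "" = c.getD (r + 1) "" := by
  cases c <;> simp [List.getD]

lemma pv_headD_eq_getD (c : List String) : c.headD "" = c.getD 0 "" := by
  cases c <;> rfl

lemma pvZipLongest_eq (cols : List (List String)) :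
    pvZipLongest cols = (List.range (pvMaxLen cols)).map (fun r => cols.map (fun c => c.getD r "")) := by
  induction hM : pvMaxLen cols generalizing cols with
  | zero =>
      rw [pvZipLongest, dif_pos ((pv_all_isEmpty_iff cols).mpr hM)]
      simp
  | succ M ih =>
      have hne : ¬ (cols.all List.isEmpty = true) := by
        rw [pv_all_isEmpty_iff]; omega
      rw [pvZipLongest, dif_neg hne]
      have ht : pvMaxLen (cols.map List.tail) = M := by
        rw [pvMaxLen_map_tail]; omega
      rw [ih _ ht, List.range_succ_eq_map]
      simp only [List.map_cons, List.map_map]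
      congr 1
      · exact List.map_congr_left fun c _ => pv_headD_eq_getD c
      · refine List.map_congr_left fun r _ => ?_
        simp only [Function.comp]
        exact List.map_congr_left fun c _ => pv_getD_tail c r

lemma pv_chars_join_nil (ps : List (List Char)) : PySem.Chars.join [] ps = ps.flatten := by
  induction ps with
  | nil => simp [PySem.Chars.join_nil]
  | cons p rest ih =>
      cases rest with
      | nil => simp [PySem.Chars.join_singleton]
      | cons q rest2 =>
          rw [PySem.Chars.join_cons_cons, List.flatten_cons, ih]
          simp

lemma pv_join_getD (L : List (List String)) (r : Nat) :
    PySem.Str.join "" (L.map (fun c => c.getD r "")) =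
    PySem.Str.join "" (L.filterMap (fun c => getElem? c r)) := by
  rw [← String.toList_inj, PySem.Str.toList_join, PySem.Str.toList_join]
  have hsep : ("" : String).toList = [] := rfl
  rw [hsep, pv_chars_join_nil, pv_chars_join_nil]
  induction L with
  | nil => rfl
  | cons c cs ih =>
      simp only [List.map_cons, List.filterMap_cons]
      cases h : getElem? c r with
      | none =>
          have hc : c.getD r "" = "" := by rw [List.getD_eq_getElem?_getD, h]; rfl
          simp only [hc, List.flatten_cons, ih]
          rfl
      | some x =>
          have hc : c.getD r "" = x := by rw [List.getD_eq_getElem?_getD, h]; rfl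
          simp only [hc, List.map_cons, List.flatten_cons, ih]

lemma pv_filter_map_eq_filterMap {α β : Type} (p : α → Prop) [DecidablePred p]
    (f : α → β) (l : List α) :
    (l.filter (fun x => decide (p x))).map f =
    l.filterMap (fun x => if p x then some (f x) else none) := by
  induction l with
  | nil => rfl
  | cons a t ih => by_cases h : p a <;> simp [List.filter_cons, List.filterMap_cons, h, ih]

lemma pv_col_get (W : List String) (pad C s : Int) (r : Nat)
    (hs0 : 0 ≤ s) (hC : 0 < C) :
    (pvColA W pad C s)[r]? =
      if s + (r : Int) < min (s + C) (W.length : Int) then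
        some (pvCell pad ((PySem.Int.toChars (min (s + C) (W.length : Int))).length)
          (s + (r : Int) + 1) (PySem.List.pyGetD W (s + (r : Int)) ""))
      else none := by
  unfold pvColA
  rw [List.getElem?_map, PySem.List.getElem?_enumerate,
    PySem.List.slice_toNat W hs0 (by omega), List.getElem?_take]
  by_cases hcond : s + (r : Int) < min (s + C) (W.length : Int)
  · have hr1 : r < (s + C).toNat - s.toNat := by omega
    have hr2 : s.toNat + r < W.length := by omega
    rw [if_pos hr1, if_pos hcond, List.getElem?_drop, List.getElem?_eq_getElem hr2]
    simp only [Option.map_some]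
    have hidx : PySem.List.pyGetD W (s + (r : Int)) "" = W[s.toNat + r] := by
      rw [PySem.List.pyGetD_eq_getElem W "" (by omega) (by push_cast; omega)]
      congr 1
      omega
    rw [hidx]
    congr 2
    omega
  · rw [if_neg hcond]
    by_cases hr1 : r < (s + C).toNat - s.toNat
    · rw [if_pos hr1, List.getElem?_drop]
      have : W.length ≤ s.toNat + r := by omega
      simp [List.getElem?_eq_none this]
    · rw [if_neg hr1]
      rfl

lemma pv_len_colA (W : List String) (pad C s : Int) (hs0 : 0 ≤ s) (hC : 0 < C) :
    (pvColA W pad C s).length = min ((s + C).toNat - s.toNat) (W.length - s.toNat) := by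
  unfold pvColA
  rw [List.length_map, PySem.List.length_enumerate,
    PySem.List.slice_toNat W hs0 (by omega), List.length_take, List.length_drop]

-- pyRange 0 b s is empty for a negative step (b ≥ 0)
lemma pv_pyRange_neg_nil (b s : Int) (hb : 0 ≤ b) (hs : s < 0) :
    PySem.List.pyRange 0 b s = [] := by
  unfold PySem.List.pyRange
  rw [if_neg (by omega)]
  simp only [if_neg (by omega : ¬ 0 < s), if_neg (by omega : ¬ b < 0)]
  rfl

lemma pv_ceilDiv_zero (nc : Int) (hn0 : nc ≠ 0) : pvCeilDiv 0 nc = 0 := by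
  unfold pvCeilDiv
  rcases lt_or_gt_of_ne hn0 with hn | hn
  · have h2 := PySem.Int.floordiv_neg_neg 0 (-nc)
    simp only [neg_zero, neg_neg] at h2
    rw [neg_zero, h2, PySem.Int.floordiv_eq_ediv_of_pos (by omega : (0:Int) < -nc)]
    simp
  · rw [neg_zero, PySem.Int.floordiv_eq_ediv_of_pos hn]
    simp

lemma pv_main (W : List String) (pad nc : Int) (hn0 : nc ≠ 0)
    (hC0 : pvCeilDiv (W.length : Int) nc ≠ 0) :
    PySem.Str.join "\n"
      ((pvZipLongest ((PySem.List.pyRange 0 (W.length : Int) (pvCeilDiv (W.length : Int) nc)).foldl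
          (fun cols s => cols ++ [pvColA W pad (pvCeilDiv (W.length : Int) nc) s]) [])).map
        (fun row => PySem.Str.join "" row)) =
    PySem.Str.join "\n"
      ((PySem.List.pyRange 0 (pvCeilDiv (W.length : Int) nc) 1).foldl (fun ls r =>
        ls ++ [PySem.Str.join ""
          (((PySem.List.pyRange 0 (W.length : Int) (pvCeilDiv (W.length : Int) nc)).foldl
              (fun ds s => ds ++ [pvDOf W (pvCeilDiv (W.length : Int) nc) s]) []).foldl
            (fun acc d => if d.1 + r < d.2.1 then
                acc ++ [pvCell pad d.2.2 (d.1 + r + 1) (PySem.List.pyGetD W (d.1 + r) "")]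
              else acc) [])]) []) := by
  set L : Int := (W.length : Int) with hL
  set C : Int := pvCeilDiv L nc with hCdef
  simp only [PySem.List.foldl_append_singleton_eq_map, List.nil_append]
  rcases lt_trichotomy C 0 with hneg | hzero | hpos
  · rw [pv_pyRange_neg_nil L C (Int.natCast_nonneg _) hneg,
      PySem.List.pyRange_one_eq_nil (by omega : C ≤ 0)]
    have hz : pvZipLongest [] = [] := by rw [pvZipLongest]; simp
    simp [hz]
  · exact absurd hzero hC0
  · -- main case: C > 0
    have hL0 : 0 < L := by
      rcases Nat.eq_zero_or_pos W.length with h | h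
      · exfalso
        apply hC0
        rw [hCdef, hL, h]
        exact_mod_cast pv_ceilDiv_zero nc hn0
      · omega
    have hnpos : 0 < nc := by
      by_contra h
      push_neg at h
      have hn : nc < 0 := lt_of_le_of_ne h hn0
      have h2 := PySem.Int.floordiv_neg_neg L (-nc)
      simp only [neg_neg] at h2
      have h3 : 0 ≤ PySem.Int.floordiv L (-nc) := by
        rw [PySem.Int.floordiv_eq_ediv_of_pos (by omega : (0:Int) < -nc)]
        exact Int.ediv_nonneg (by omega) (by omega)
      have : C ≤ 0 := by
        rw [hCdef]
        unfold pvCeilDiv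
        rw [h2]
        omega
      omega
    have hbr : (C - 1) * nc < L ∧ L ≤ C * nc :=
      (PySem.Int.neg_floordiv_neg_eq_iff_of_pos hnpos).mp (by rw [hCdef]; rfl)
    have hCL : C ≤ L := by
      have h1 : C - 1 ≤ (C - 1) * nc := le_mul_of_one_le_right (by omega) (by omega)
      have h2 : C - 1 < L := lt_of_le_of_lt h1 hbr.1
      omega
    -- row count: maxLen of the columns is C.toNat
    have hmax : pvMaxLen ((PySem.List.pyRange 0 L C).map (pvColA W pad C)) = C.toNat := by
      apply le_antisymm
      · apply pv_maxLen_le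
        intro c hc
        obtain ⟨s, hsR, rfl⟩ := List.mem_map.mp hc
        obtain ⟨hs0, hsL, -⟩ := (PySem.List.mem_pyRange_iff_of_pos hpos s).mp hsR
        rw [pv_len_colA W pad C s hs0 hpos]
        omega
      · have h0 : (0 : Int) ∈ PySem.List.pyRange 0 L C :=
          (PySem.List.mem_pyRange_iff_of_pos hpos 0).mpr ⟨le_refl 0, hL0, by simp⟩
        have hmem := pv_le_maxLen (List.mem_map_of_mem (f := pvColA W pad C) h0)
        rw [pv_len_colA W pad C 0 (le_refl 0) hpos] at hmem
        omega
    rw [pvZipLongest_eq, hmax, PySem.List.pyRange_one 0 C]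
    simp only [sub_zero, List.map_map]
    refine congrArg _ (List.map_congr_left fun k hk => ?_)
    simp only [Function.comp_apply]
    -- per-row equality, row index k : Nat, Python row index 0 + ↑k
    rw [← List.map_map]
    rw [PySem.List.foldl_append_ite
      (p := fun d : Int × Int × Nat => d.1 + (0 + (k : Int)) < d.2.1)
      (f := fun d : Int × Int × Nat => pvCell pad d.2.2 (d.1 + (0 + (k : Int)) + 1)
        (PySem.List.pyGetD W (d.1 + (0 + (k : Int))) ""))]
    simp only [List.nil_append]
    rw [pv_join_getD, List.filterMap_map, List.filter_map, List.map_map]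
    simp only [Function.comp_def]
    rw [pv_filter_map_eq_filterMap (p := fun s => (pvDOf W C s).1 + (0 + (k : Int)) < (pvDOf W C s).2.1)
        (f := fun s => pvCell pad (pvDOf W C s).2.2 ((pvDOf W C s).1 + (0 + (k : Int)) + 1)
          (PySem.List.pyGetD W ((pvDOf W C s).1 + (0 + (k : Int))) ""))]
    refine congrArg _ (List.filterMap_congr fun s hs => ?_)
    obtain ⟨hs0, hsL, -⟩ := (PySem.List.mem_pyRange_iff_of_pos hpos s).mp hs
    rw [pv_col_get W pad C s k hs0 hpos]
    simp only [pvDOf, zero_add]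

-- ===== VERDICT (by name: the statement is the Claim_ definition above) =====
theorem format_mnemonic_spec : Claim_equal_format_mnemonic := by
  intro str_value pad_width n_columns numbers hDom hPre
  obtain ⟨hn0, hC0⟩ := hPre
  show format_mnemonic str_value pad_width n_columns numbers =
    format_mnemonic_alt str_value pad_width n_columns numbers
  exact pv_main (PySem.Str.split₀ str_value) pad_width n_columns hn0 hC0
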